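-- pv_equiv track=rewrite | github.com/J-Krisz/Practice | Python/50_essential_exercises/strings/exercise_07.py | ubbi_dubbi
-- ===== SOURCE A (Python) =====
-- def ubbi_dubbi(word):
--
--     translated_word = []
--     for char in word:
--         if char in "aeiou":
--             translated_word.append(f"ub{char}")
--         else:
--             translated_word.append(char)
--
--     return "".join(translated_word)
-- ===== SOURCE B (Python) =====
-- def ubbi_dubbi(word):
--     positions = [i for i, c in enumerate(word) if c in "aeiou"]
--     parts = []
--     prev = 0
--     for i in positions:
--         parts.append(word[prev:i])
--         parts.append("ub")
--         prev = i
--     parts.append(word[prev:])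
--     return "".join(parts)
-- ===== Notes on version B (the rewrite author's own statement) =====
-- stated objective: alternative
-- what changed: Instead of translating character by character, B first computes the list of vowel positions, then assembles the result from slices of the original word between consecutive vowel positions with the two-letter prefix inserted before each vowel; non-vowel stretches are copied as whole slices rather than examined one character at a time.
import Mathlib
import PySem

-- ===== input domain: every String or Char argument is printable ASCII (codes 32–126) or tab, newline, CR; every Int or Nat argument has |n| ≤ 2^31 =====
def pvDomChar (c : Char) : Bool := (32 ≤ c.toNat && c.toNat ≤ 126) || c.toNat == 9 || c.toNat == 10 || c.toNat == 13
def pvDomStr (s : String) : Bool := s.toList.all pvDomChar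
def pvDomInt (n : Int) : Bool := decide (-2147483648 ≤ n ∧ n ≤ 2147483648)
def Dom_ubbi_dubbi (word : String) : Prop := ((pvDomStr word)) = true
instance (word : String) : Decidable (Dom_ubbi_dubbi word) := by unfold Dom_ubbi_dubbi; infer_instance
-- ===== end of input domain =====

-- B replaces A's per-character translate loop by a two-stage slice assembly:
-- collect the vowel positions, then stitch together slices of the original word
-- with "ub" inserted before each vowel position (alternative algorithm, same cost).

-- the string literal "aeiou", as a char list (strings are handled on the List Char side)
def ubbi_vowels : List Char := ['a', 'e', 'i', 'o', 'u']

-- ===== PORT A =====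
-- for char in word: append "ub"+char if char in "aeiou" else char; then "".join
def ubbi_dubbi (word : String) : String :=
  String.ofList
    ((word.toList.foldl
        (fun acc char =>
          if ubbi_vowels.contains char then
            acc ++ [['u', 'b', char]]
          else
            acc ++ [[char]])
        []).flatten)   -- "".join of the collected pieces

-- ===== PORT B =====
-- positions = [i for i, c in enumerate(word) if c in "aeiou"]
def ubbi_positions (cs : List Char) : List Int :=
  ((PySem.List.enumerate cs 0).filter (fun p => ubbi_vowels.contains p.2)).map (·.1)

-- one iteration of B's assembly loop: parts += [word[prev:i], "ub"]; prev = i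
def ubbi_assemble_step (cs : List Char) (st : List (List Char) × Int) (i : Int) :
    List (List Char) × Int :=
  (st.1 ++ [PySem.List.slice cs (some st.2) (some i), ['u', 'b']], i)

-- assemble from slices: for i in positions: parts += [word[prev:i], "ub"]; prev = i
-- then parts.append(word[prev:]); "".join(parts)
def ubbi_dubbi_alt (word : String) : String :=
  let cs := word.toList
  let st := (ubbi_positions cs).foldl (ubbi_assemble_step cs) ([], 0)
  String.ofList ((st.1 ++ [PySem.List.slice cs (some st.2) none]).flatten)

-- ===== PRECONDITION & SPEC =====
def Spec_ubbi_dubbi (word : String) (out : String) : Prop := out = ubbi_dubbi_alt word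
instance (word : String) (out : String) : Decidable (Spec_ubbi_dubbi word out) := by unfold Spec_ubbi_dubbi; infer_instance

-- ===== CLAIM (what is proved, stated in full; the proofs are below) =====
def Claim_equal_ubbi_dubbi : Prop := ∀ (word : String), Dom_ubbi_dubbi word → Spec_ubbi_dubbi word (ubbi_dubbi word)

-- ===== LEMMAS AND PROOFS =====

-- the translated piece for one character
def ubbi_piece (c : Char) : List Char :=
  if ubbi_vowels.contains c then ['u', 'b', c] else [c]

-- A's foldl with an accumulator, characterised as a flatMap of per-char pieces
theorem ubbi_foldl (l : List Char) (acc : List (List Char)) :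
    l.foldl
      (fun acc char =>
        if ubbi_vowels.contains char then
          acc ++ [['u', 'b', char]]
        else
          acc ++ [[char]])
      acc
    = acc ++ l.map ubbi_piece := by
  induction l generalizing acc with
  | nil => simp
  | cons x xs ih =>
    rw [List.foldl_cons, ih, List.map_cons]
    simp only [ubbi_piece]
    split_ifs <;> simp

-- vowel positions of cs ++ [c]
theorem ubbi_positions_append (cs : List Char) (c : Char) :
    ubbi_positions (cs ++ [c])
      = ubbi_positions cs
        ++ (if c ∈ ubbi_vowels then [((cs.length : Int))] else []) := by
  unfold ubbi_positions
  rw [PySem.List.enumerate_append, List.filter_append, List.map_append]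
  congr 1
  by_cases hv : c ∈ ubbi_vowels
  · simp [PySem.List.enumerate_cons, PySem.List.enumerate_nil, hv]
  · simp [PySem.List.enumerate_cons, PySem.List.enumerate_nil, hv]

-- a slice with bounds inside cs ignores an appended element
theorem ubbi_slice_extend (cs : List Char) (c : Char) (a b : Int)
    (ha0 : 0 ≤ a) (hb0 : 0 ≤ b) (hb : b ≤ (cs.length : Int)) :
    PySem.List.slice (cs ++ [c]) (some a) (some b) = PySem.List.slice cs (some a) (some b) := by
  rw [PySem.List.slice_toNat _ ha0 hb0, PySem.List.slice_toNat _ ha0 hb0]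
  have hble : b.toNat ≤ cs.length := by omega
  by_cases hale : a.toNat ≤ cs.length
  · rw [List.drop_append_of_le_length hale]
    have : b.toNat - a.toNat ≤ (cs.drop a.toNat).length := by simp; omega
    rw [List.take_append_of_le_length this]
  · have h1 : cs.drop a.toNat = [] := by
      apply List.drop_eq_nil_of_le; omega
    have h2 : b.toNat - a.toNat = 0 := by omega
    simp [h2]

-- the assembly fold over in-range positions ignores an appended element
theorem ubbi_fold_extend (cs : List Char) (c : Char) (ps : List Int) :
    ∀ (acc : List (List Char)) (prev : Int), 0 ≤ prev →
    (∀ i ∈ ps, 0 ≤ i ∧ i ≤ (cs.length : Int)) →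
    ps.foldl (ubbi_assemble_step (cs ++ [c])) (acc, prev)
      = ps.foldl (ubbi_assemble_step cs) (acc, prev) := by
  induction ps with
  | nil => intro _ _ _ _; rfl
  | cons i is ih =>
    intro acc prev hprev hmem
    obtain ⟨hi0, hile⟩ := hmem i (List.mem_cons_self ..)
    rw [List.foldl_cons, List.foldl_cons]
    show is.foldl (ubbi_assemble_step (cs ++ [c])) (ubbi_assemble_step (cs ++ [c]) (acc, prev) i) = _
    rw [show ubbi_assemble_step (cs ++ [c]) (acc, prev) i = ubbi_assemble_step cs (acc, prev) i from by
      unfold ubbi_assemble_step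
      rw [ubbi_slice_extend cs c prev i hprev hi0 hile]]
    exact ih _ i hi0 (fun j hj => hmem j (List.mem_cons_of_mem _ hj))

-- every vowel position is in range
theorem ubbi_positions_bound (cs : List Char) :
    ∀ i ∈ ubbi_positions cs, 0 ≤ i ∧ i ≤ (cs.length : Int) := by
  intro i hi
  unfold ubbi_positions at hi
  simp only [List.mem_map, List.mem_filter] at hi
  obtain ⟨p, ⟨hp, _⟩, rfl⟩ := hi
  rw [PySem.List.mem_enumerate_iff] at hp
  obtain ⟨k, hk, rfl⟩ := hp
  simp; omega

-- main invariant: B's assembly over cs produces the flatMap of per-char pieces,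
-- and the final prev stays in range
theorem ubbi_assemble_main (cs : List Char) :
    ((((ubbi_positions cs).foldl (ubbi_assemble_step cs) ([], 0)).1
        ++ [PySem.List.slice cs (some ((ubbi_positions cs).foldl (ubbi_assemble_step cs) ([], 0)).2) none]).flatten
      = cs.flatMap ubbi_piece)
    ∧ 0 ≤ ((ubbi_positions cs).foldl (ubbi_assemble_step cs) ([], 0)).2
    ∧ ((ubbi_positions cs).foldl (ubbi_assemble_step cs) ([], 0)).2 ≤ (cs.length : Int) := by
  induction cs using List.reverseRecOn with
  | nil => simp [ubbi_positions, PySem.List.enumerate]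
  | append_singleton cs c ih =>
    obtain ⟨ihflat, ihp0, ihple⟩ := ih
    set st := (ubbi_positions cs).foldl (ubbi_assemble_step cs) ([], 0) with hst
    have hext : (ubbi_positions cs).foldl (ubbi_assemble_step (cs ++ [c])) ([], 0) = st := by
      rw [hst]
      exact ubbi_fold_extend cs c _ [] 0 le_rfl (ubbi_positions_bound cs)
    have hdrop : PySem.List.slice (cs ++ [c]) (some st.2) none = PySem.List.slice cs (some st.2) none ++ [c] := by
      rw [PySem.List.slice_from _ ihp0, PySem.List.slice_from _ ihp0]
      rw [List.drop_append_of_le_length (by omega)]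
    by_cases hv : c ∈ ubbi_vowels
    · -- c is a vowel: one more position at cs.length
      rw [ubbi_positions_append, if_pos hv, List.foldl_append, hext]
      have hstep : [((cs.length : Int))].foldl (ubbi_assemble_step (cs ++ [c])) st
          = (st.1 ++ [PySem.List.slice (cs ++ [c]) (some st.2) (some (cs.length : Int)), ['u','b']], (cs.length : Int)) := rfl
      rw [hstep]
      have hsl : PySem.List.slice (cs ++ [c]) (some st.2) (some ((cs.length : Int)))
          = PySem.List.slice cs (some st.2) none := by
        rw [ubbi_slice_extend cs c st.2 _ ihp0 (by positivity) le_rfl,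
            PySem.List.slice_toNat _ ihp0 (by positivity), PySem.List.slice_from _ ihp0]
        exact List.take_of_length_le (by simp)
      constructor
      · simp only [hsl]
        have htail : PySem.List.slice (cs ++ [c]) (some ((cs.length : Int))) none = [c] := by
          rw [PySem.List.slice_from _ (by positivity)]
          simp
        rw [htail, List.flatMap_append]
        rw [List.flatten_append] at ihflat ⊢
        simp only [List.flatten_cons, List.flatten_nil, List.append_nil] at ihflat ⊢
        simp [ubbi_piece, hv, ← ihflat]
      · simp
    · -- c is not a vowel: positions unchanged, prev slice gains c at the end
      rw [ubbi_positions_append, if_neg hv]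
      simp only [List.append_nil, hext]
      refine ⟨?_, ihp0, by simp; omega⟩
      rw [hdrop, List.flatMap_append]
      rw [List.flatten_append] at ihflat ⊢
      simp only [List.flatten_cons, List.flatten_nil, List.append_nil] at ihflat ⊢
      simp [ubbi_piece, hv, ← ihflat]

-- ===== VERDICT (by name: the statement is the Claim_ definition above) =====
theorem ubbi_dubbi_spec : Claim_equal_ubbi_dubbi := by
  intro word _
  unfold Spec_ubbi_dubbi ubbi_dubbi ubbi_dubbi_alt
  rw [ubbi_foldl, List.nil_append]
  have := (ubbi_assemble_main word.toList).1
  simp only [this]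
  rw [List.flatMap_def]
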